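-- pv_equiv track=rewrite | github.com/Dark-Alex-17/loki | scripts/update_models.py | get_openrouter_model
-- ===== SOURCE A (Python) =====
-- def get_openrouter_model(models_data, provider_prefix, model_name, is_openrouter_provider=False):
--     if is_openrouter_provider:
--         # For openrouter provider, the model_name in yaml is usually the full ID
--         for model in models_data:
--             if model["id"] == model_name:
--                 return model
--         return None
--
--     expected_id = f"{provider_prefix}/{model_name}"
--
--     # 1. Try exact match on ID
--     for model in models_data:
--         if model["id"] == expected_id:
--             return model
--
--     # 2. Try match by suffix
--     for model in models_data:
--         if model["id"].split("/")[-1] == model_name: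
--             if model["id"].startswith(f"{provider_prefix}/"):
--                 return model
--
--     return None
-- ===== SOURCE B (Python) =====
-- def get_openrouter_model(models_data, provider_prefix, model_name, is_openrouter_provider=False):
--     if is_openrouter_provider:
--         # For openrouter provider, the model_name in yaml is usually the full ID
--         return next((m for m in models_data if m["id"] == model_name), None)
--
--     expected_id = f"{provider_prefix}/{model_name}"
--     wanted_prefix = f"{provider_prefix}/"
--     suffix_match = None
--
--     # single pass: exact match wins immediately; remember the first suffix match
--     for model in models_data:
--         model_id = model["id"]
--         if model_id == expected_id:
--             return model
--         if suffix_match is None and model_id.split("/")[-1] == model_name and model_id.startswith(wanted_prefix):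
--             suffix_match = model
--     return suffix_match
-- ===== Notes on version B (the rewrite author's own statement) =====
-- stated objective: simpler
-- what changed: The two sequential full scans (exact-id pass, then suffix pass) are merged into one pass that returns immediately on an exact id match and remembers only the first suffix match, returned after the loop; the openrouter branch becomes a next() over a generator.
import Mathlib
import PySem

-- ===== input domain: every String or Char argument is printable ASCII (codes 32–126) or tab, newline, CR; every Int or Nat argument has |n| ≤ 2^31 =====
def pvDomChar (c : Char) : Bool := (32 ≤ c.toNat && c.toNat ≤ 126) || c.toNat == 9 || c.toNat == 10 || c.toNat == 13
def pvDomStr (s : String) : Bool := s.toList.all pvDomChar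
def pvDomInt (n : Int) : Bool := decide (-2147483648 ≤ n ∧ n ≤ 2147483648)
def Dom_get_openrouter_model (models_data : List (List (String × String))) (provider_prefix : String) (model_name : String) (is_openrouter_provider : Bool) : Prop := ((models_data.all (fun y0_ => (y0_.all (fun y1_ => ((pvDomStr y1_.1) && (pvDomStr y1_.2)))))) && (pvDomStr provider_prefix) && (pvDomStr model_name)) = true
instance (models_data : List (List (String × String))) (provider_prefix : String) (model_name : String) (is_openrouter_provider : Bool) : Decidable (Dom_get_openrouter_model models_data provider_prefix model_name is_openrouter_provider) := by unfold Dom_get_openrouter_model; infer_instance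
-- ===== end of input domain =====

-- B merges A's two sequential scans into a single pass (exact match returns at once,
-- first suffix match is remembered and returned after the loop); objective: simpler.

-- model["id"] with the first-match dict convention (Pre_ guarantees the key is present)
def pvId (m : List (String × String)) : String := (List.lookup "id" m).getD ""

-- model_id.split("/")[-1]
def pvLastSeg (s : String) : String :=
  (PySem.List.pyGet? ((PySem.Str.split? s "/").getD []) (-1)).getD ""

-- ===== PORT A =====
-- first loop of A: exact match on id against tgt
def aScan1 (tgt : String) : List (List (String × String)) → Option (List (String × String))
  | [] => none
  | m :: rest => if pvId m == tgt then some m else aScan1 tgt rest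

-- second loop of A: suffix match, then the nested startswith test (falls through otherwise)
def aScan2 (provider_prefix model_name : String) :
    List (List (String × String)) → Option (List (String × String))
  | [] => none
  | m :: rest =>
    if pvLastSeg (pvId m) == model_name then
      if PySem.Str.startswith (pvId m) (provider_prefix ++ "/") then some m
      else aScan2 provider_prefix model_name rest
    else aScan2 provider_prefix model_name rest

def get_openrouter_model (models_data : List (List (String × String))) (provider_prefix : String) (model_name : String) (is_openrouter_provider : Bool) : Option (List (String × String)) :=
  if is_openrouter_provider then
    aScan1 model_name models_data
  else
    let expected_id := provider_prefix ++ "/" ++ model_name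
    match aScan1 expected_id models_data with
    | some m => some m
    | none => aScan2 provider_prefix model_name models_data

-- ===== PORT B =====
-- B's single loop: return on exact id match, remember the first suffix match
def bLoop (expected_id wanted_prefix model_name : String) :
    List (List (String × String)) → Option (List (String × String)) → Option (List (String × String))
  | [], suffix_match => suffix_match
  | m :: rest, suffix_match =>
    let model_id := pvId m
    if model_id == expected_id then some m
    else
      bLoop expected_id wanted_prefix model_name rest
        (if suffix_match.isNone && (pvLastSeg model_id == model_name)
            && PySem.Str.startswith model_id wanted_prefix then some m else suffix_match)

def get_openrouter_model_alt (models_data : List (List (String × String))) (provider_prefix : String) (model_name : String) (is_openrouter_provider : Bool) : Option (List (String × String)) :=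
  if is_openrouter_provider then
    models_data.find? (fun m => pvId m == model_name)   -- next((m for m in … if …), None)
  else
    let expected_id := provider_prefix ++ "/" ++ model_name
    let wanted_prefix := provider_prefix ++ "/"
    bLoop expected_id wanted_prefix model_name models_data none

-- ===== PRECONDITION & SPEC =====
-- Pre_ excludes exactly the inputs on which Python A raises KeyError: some model lacks the
-- "id" key and no exact id match occurs among the models before the first such model.
def Pre_get_openrouter_model (models_data : List (List (String × String))) (provider_prefix : String) (model_name : String) (is_openrouter_provider : Bool) : Prop :=
  (models_data.all (fun m => (List.lookup "id" m).isSome) = true) ∨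
  ((models_data.takeWhile (fun m => (List.lookup "id" m).isSome)).any
      (fun m => (List.lookup "id" m).getD "" ==
        (if is_openrouter_provider then model_name else provider_prefix ++ "/" ++ model_name)) = true)
instance (models_data : List (List (String × String))) (provider_prefix : String) (model_name : String) (is_openrouter_provider : Bool) : Decidable (Pre_get_openrouter_model models_data provider_prefix model_name is_openrouter_provider) := by unfold Pre_get_openrouter_model; infer_instance

def pvWitness_get_openrouter_model : (List (List (String × String))) × String × String × Bool :=
  ([[("id", "openai/gpt-4")], [("id", "other/gpt-4")]], "openai", "gpt-4", false)

def Spec_get_openrouter_model (models_data : List (List (String × String))) (provider_prefix : String) (model_name : String) (is_openrouter_provider : Bool) (out : Option (List (String × String))) : Prop := out = get_openrouter_model_alt models_data provider_prefix model_name is_openrouter_provider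
instance (models_data : List (List (String × String))) (provider_prefix : String) (model_name : String) (is_openrouter_provider : Bool) (out : Option (List (String × String))) : Decidable (Spec_get_openrouter_model models_data provider_prefix model_name is_openrouter_provider out) := by unfold Spec_get_openrouter_model; infer_instance

-- ===== CLAIM (what is proved, stated in full; the proofs are below) =====
def Claim_equal_get_openrouter_model : Prop := ∀ (models_data : List (List (String × String))) (provider_prefix : String) (model_name : String) (is_openrouter_provider : Bool), Dom_get_openrouter_model models_data provider_prefix model_name is_openrouter_provider → Pre_get_openrouter_model models_data provider_prefix model_name is_openrouter_provider → Spec_get_openrouter_model models_data provider_prefix model_name is_openrouter_provider (get_openrouter_model models_data provider_prefix model_name is_openrouter_provider)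

-- ===== LEMMAS AND PROOFS =====

theorem aScan1_eq_find (tgt : String) (xs : List (List (String × String))) :
    aScan1 tgt xs = xs.find? (fun m => pvId m == tgt) := by
  induction xs with
  | nil => rfl
  | cons m rest ih =>
    simp only [aScan1, List.find?]
    by_cases h : pvId m == tgt
    · simp [h]
    · simp [h, ih]

theorem aScan2_eq_find (pp mn : String) (xs : List (List (String × String))) :
    aScan2 pp mn xs =
      xs.find? (fun m => (pvLastSeg (pvId m) == mn) && PySem.Str.startswith (pvId m) (pp ++ "/")) := by
  induction xs with
  | nil => rfl
  | cons m rest ih =>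
    simp only [aScan2, List.find?]
    cases h1 : pvLastSeg (pvId m) == mn with
    | true =>
      cases h2 : PySem.Str.startswith (pvId m) (pp ++ "/") with
      | true => simp only [if_true, Bool.true_and, Bool.and_self]
      | false => simp only [if_true, Bool.false_eq_true, if_false, Bool.and_false, ih]
    | false => simp only [Bool.false_eq_true, if_false, Bool.false_and, ih]

theorem bLoop_eq (expected wanted mn : String) (xs : List (List (String × String)))
    (s : Option (List (String × String))) :
    bLoop expected wanted mn xs s =
      match xs.find? (fun m => pvId m == expected) with
      | some m => some m
      | none => match s with
        | some v => some v
        | none => xs.find? (fun m => (pvLastSeg (pvId m) == mn)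
            && PySem.Str.startswith (pvId m) wanted) := by
  induction xs generalizing s with
  | nil => cases s <;> rfl
  | cons m rest ih =>
    simp only [bLoop, List.find?]
    cases he : pvId m == expected with
    | true => simp only [if_true]
    | false =>
      simp only [Bool.false_eq_true, if_false]
      rw [ih]
      cases hf : List.find? (fun m => pvId m == expected) rest with
      | some v => rfl
      | none =>
        cases s with
        | some v => simp
        | none =>
          simp only [Option.isNone_none, Bool.true_and]
          cases hs : (pvLastSeg (pvId m) == mn) && PySem.Str.startswith (pvId m) wanted with
          | true => simp
          | false => simp

-- ===== VERDICT (by name: the statement is the Claim_ definition above) =====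
theorem get_openrouter_model_spec : Claim_equal_get_openrouter_model := by
  intro models_data pp mn op _ _
  unfold Spec_get_openrouter_model get_openrouter_model get_openrouter_model_alt
  cases op with
  | true => simp only [if_true, aScan1_eq_find]
  | false =>
    simp only [Bool.false_eq_true, if_false]
    rw [bLoop_eq, aScan1_eq_find, aScan2_eq_find]
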